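-- pv_equiv track=rewrite | github.com/Glacoon/Advent-of-Code | 2025/2-12.py | generate_invalid_ids
-- ===== SOURCE A (Python) =====
-- def generate_invalid_ids(max_id_value):
--     """
--         Generate a set of every invalid ids possible from 1 to the biggest Id from the list of ranges
--
--     Args:
--         max_id_value (_type_): biggest id reachable
--
--     Returns:
--         _type_: Set of invalid ids
--     """
--     invalid_ids_set = set()
--     max_len_pattern = len(str(max_id_value)) // 2
--
--     for pattern_length in range(1, max_len_pattern + 1):
--
--         start_pattern_value = 10 ** (pattern_length - 1)
--         end_pattern_value = 10 ** pattern_length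
--
--         for base_Pattern_Value in range(start_pattern_value, end_pattern_value):
--
--             id_String = str(base_Pattern_Value) * 2
--             invalid_ID_Value = int(id_String)
--
--             if invalid_ID_Value > max_id_value:
--                 break
--
--             invalid_ids_set.add(invalid_ID_Value)
--
--     return invalid_ids_set
-- ===== SOURCE B (Python) =====
-- def generate_invalid_ids(max_id_value):
--     """Same result as A, but each doubled-pattern id is built arithmetically:
--     a pattern base of length L doubled is base * (10**L + 1), and instead of
--     scanning bases until the id exceeds max_id_value, the largest valid base
--     is computed in closed form with one floor division."""
--     invalid_ids_set = set()
--     max_len_pattern = len(str(max_id_value)) // 2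
--     for pattern_length in range(1, max_len_pattern + 1):
--         rep = 10 ** pattern_length + 1
--         upper = min(10 ** pattern_length - 1, max_id_value // rep)
--         invalid_ids_set.update(base * rep for base in range(10 ** (pattern_length - 1), upper + 1))
--     return invalid_ids_set
-- ===== Notes on version B (the rewrite author's own statement) =====
-- stated objective: alternative
-- what changed: Each invalid id is computed arithmetically as base*(10**L+1) and the inner scan-until-exceeds loop with per-id string building/parsing is replaced by a closed-form upper bound (one floor division per length) plus a single range, so no string is ever built and no probe element is scanned.
import Mathlib
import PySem

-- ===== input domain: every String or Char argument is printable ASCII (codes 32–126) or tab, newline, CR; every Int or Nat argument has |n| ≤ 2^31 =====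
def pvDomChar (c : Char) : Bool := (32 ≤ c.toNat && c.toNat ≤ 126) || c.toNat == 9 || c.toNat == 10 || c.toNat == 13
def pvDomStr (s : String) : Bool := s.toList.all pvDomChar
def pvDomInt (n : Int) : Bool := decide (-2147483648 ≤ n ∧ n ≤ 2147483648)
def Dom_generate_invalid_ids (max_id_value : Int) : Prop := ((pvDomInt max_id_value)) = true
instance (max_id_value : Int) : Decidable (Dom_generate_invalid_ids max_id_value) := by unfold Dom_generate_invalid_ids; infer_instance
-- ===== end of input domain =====

-- B replaces A's per-id string building/parsing and scan-until-exceeds inner loop by the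
-- arithmetic form base*(10^L+1) with a closed-form largest base (one floor division per L).

-- ===== PORT A =====

-- Python's int(s), ported by hand as the decimal digit fold; exact on the inputs A feeds it:
-- str(b)*2 with b ≥ 1 is always a nonempty string of ASCII digits, where int() is this fold.
def pvIntOfDigits (cs : List Char) : Int :=
  cs.foldl (fun a c => a * 10 + ((c.toNat : Int) - 48)) 0

-- the inner 'for base_Pattern_Value in range(start, end): … break …' loop of A
def pvInnerA : List Int → Int → PySem.Set Int → PySem.Set Int
  | [], _, s => s
  | b :: rest, maxv, s =>
    -- id_String = str(base_Pattern_Value) * 2 ; invalid_ID_Value = int(id_String)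
    let v := pvIntOfDigits (PySem.Int.toChars b ++ PySem.Int.toChars b)
    if v > maxv then s                      -- break
    else pvInnerA rest maxv (PySem.Set.add s v)

def generate_invalid_ids (max_id_value : Int) : List Int :=
  let max_len_pattern := PySem.Int.floordiv (PySem.Str.len (PySem.Int.toStr max_id_value)) 2
  (PySem.List.pyRange 1 (max_len_pattern + 1) 1).foldl
    (fun invalid_ids_set pattern_length =>
      -- 10 ** (pattern_length - 1) / 10 ** pattern_length; the exponents are ≥ 0 for every
      -- pattern_length this range yields, so .toNat is exact
      let start_pattern_value := (10 : Int) ^ (pattern_length - 1).toNat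
      let end_pattern_value := (10 : Int) ^ pattern_length.toNat
      pvInnerA (PySem.List.pyRange start_pattern_value end_pattern_value 1) max_id_value
        invalid_ids_set)
    PySem.Set.empty

-- ===== PORT B =====

def generate_invalid_ids_alt (max_id_value : Int) : List Int :=
  let max_len_pattern := PySem.Int.floordiv (PySem.Str.len (PySem.Int.toStr max_id_value)) 2
  (PySem.List.pyRange 1 (max_len_pattern + 1) 1).foldl
    (fun invalid_ids_set pattern_length =>
      let rep := (10 : Int) ^ pattern_length.toNat + 1
      let upper := min ((10 : Int) ^ pattern_length.toNat - 1)
        (PySem.Int.floordiv max_id_value rep)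
      (PySem.List.pyRange ((10 : Int) ^ (pattern_length - 1).toNat) (upper + 1) 1).foldl
        (fun s base => PySem.Set.add s (base * rep)) invalid_ids_set)
    PySem.Set.empty

-- ===== PRECONDITION & SPEC =====
def Spec_generate_invalid_ids (max_id_value : Int) (out : List Int) : Prop := out = generate_invalid_ids_alt max_id_value
instance (max_id_value : Int) (out : List Int) : Decidable (Spec_generate_invalid_ids max_id_value out) := by unfold Spec_generate_invalid_ids; infer_instance

-- ===== CLAIM (what is proved, stated in full; the proofs are below) =====
def Claim_equal_generate_invalid_ids : Prop := ∀ (max_id_value : Int), Dom_generate_invalid_ids max_id_value → Spec_generate_invalid_ids max_id_value (generate_invalid_ids max_id_value)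

-- ===== LEMMAS AND PROOFS =====

theorem pvDigitChar_val (d : Nat) (hd : d < 10) : ((Nat.digitChar d).toNat : Int) - 48 = (d : Int) := by
  interval_cases d <;> decide

theorem pvRevFold (l : List Nat) (hl : ∀ d ∈ l, d < 10) (a : Int) :
    (l.reverse.map Nat.digitChar).foldl (fun a c => a * 10 + ((c.toNat : Int) - 48)) a
      = a * 10 ^ l.length + Nat.ofDigits (10 : Int) l := by
  induction l generalizing a with
  | nil => simp [Nat.ofDigits]
  | cons d l ih =>
    simp only [List.reverse_cons, List.map_append, List.foldl_append, List.map_cons,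
      List.map_nil, List.foldl_cons, List.foldl_nil, List.length_cons]
    rw [ih (fun x hx => hl x (List.mem_cons_of_mem d hx)) a,
      pvDigitChar_val d (hl d List.mem_cons_self)]
    show _ = _ + ((d : Int) + 10 * Nat.ofDigits 10 l)
    ring

theorem pvToDigitsCore_eq (fuel : Nat) : ∀ (m : Nat) (ds : List Char), m < fuel → 0 < m →
    Nat.toDigitsCore 10 fuel m ds = ((Nat.digits 10 m).reverse.map Nat.digitChar) ++ ds := by
  induction fuel with
  | zero => omega
  | succ f ih =>
    intro m ds hm h0
    rw [Nat.toDigitsCore]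
    by_cases hq : m / 10 = 0
    · simp only [hq, if_true]
      rw [Nat.digits_def' (by norm_num) h0, hq, Nat.digits_zero]
      have : m % 10 = m := Nat.mod_eq_of_lt (by omega)
      simp [this]
    · simp only [hq, if_false]
      rw [ih (m / 10) _ (by omega) (Nat.pos_of_ne_zero hq),
        Nat.digits_def' (by norm_num) h0]
      simp

theorem pvToDigits_eq (m : Nat) (h0 : 0 < m) :
    Nat.toDigits 10 m = (Nat.digits 10 m).reverse.map Nat.digitChar := by
  rw [Nat.toDigits, pvToDigitsCore_eq (m + 1) m [] (by omega) h0, List.append_nil]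

-- str(b) for b in [10^(n-1), 10^n) folds, from accumulator a, to a*10^n + b
theorem pvFold_toChars (n : Nat) (hn : 1 ≤ n) (b : Int)
    (h1 : (10 : Int) ^ (n - 1) ≤ b) (h2 : b < (10 : Int) ^ n) (a : Int) :
    (PySem.Int.toChars b).foldl (fun a c => a * 10 + ((c.toNat : Int) - 48)) a
      = a * 10 ^ n + b := by
  have hb : (1 : Int) ≤ b := le_trans (one_le_pow₀ (by norm_num)) h1
  have hbm : b = (b.toNat : Int) := by omega
  have h1' : 10 ^ (n - 1) ≤ b.toNat := by exact_mod_cast hbm ▸ h1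
  have h2' : b.toNat < 10 ^ n := by exact_mod_cast hbm ▸ h2
  have h0 : 0 < b.toNat := by omega
  have hlen : (Nat.digits 10 b.toNat).length = n := by
    rw [Nat.length_digits 10 b.toNat (by norm_num) (by omega),
      Nat.log_eq_of_pow_le_of_lt_pow (by simpa using h1') (by simpa [Nat.sub_add_cancel hn] using h2')]
    omega
  have htc : PySem.Int.toChars b = (Nat.digits 10 b.toNat).reverse.map Nat.digitChar := by
    rw [PySem.Int.toChars, if_neg (by omega), pvToDigits_eq b.toNat h0]
  rw [htc, pvRevFold _ (fun d hd => Nat.digits_lt_base (by norm_num) hd) a, hlen,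
    show ((10:ℤ)) = ((10:ℕ):ℤ) by norm_num, ← Nat.coe_ofDigits, Nat.ofDigits_digits]
  omega


theorem pvDouble_val (n : Nat) (hn : 1 ≤ n) (b : Int)
    (h1 : (10 : Int) ^ (n - 1) ≤ b) (h2 : b < (10 : Int) ^ n) :
    pvIntOfDigits (PySem.Int.toChars b ++ PySem.Int.toChars b) = b * ((10 : Int) ^ n + 1) := by
  unfold pvIntOfDigits
  rw [List.foldl_append, pvFold_toChars n hn b h1 h2, pvFold_toChars n hn b h1 h2]
  ring

theorem pvInner_eq (n : Nat) (hn : 1 ≤ n) (maxv : Int) :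
    ∀ (k : Nat) (s : Int) (acc : PySem.Set Int), (10 : Int) ^ (n - 1) ≤ s →
      ((10 : Int) ^ n - s).toNat ≤ k →
    pvInnerA (PySem.List.pyRange s ((10 : Int) ^ n) 1) maxv acc
      = (PySem.List.pyRange s
            (min ((10 : Int) ^ n - 1) (PySem.Int.floordiv maxv ((10 : Int) ^ n + 1)) + 1) 1).foldl
          (fun st b => PySem.Set.add st (b * ((10 : Int) ^ n + 1))) acc := by
  have hrep : (0 : Int) < 10 ^ n + 1 := by positivity
  intro k
  induction k with
  | zero =>
    intro s acc hs hk
    have hend : (10 : Int) ^ n ≤ s := by omega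
    rw [PySem.List.pyRange_one_eq_nil hend,
      PySem.List.pyRange_one_eq_nil (by
        have : min ((10 : Int) ^ n - 1) (PySem.Int.floordiv maxv ((10 : Int) ^ n + 1)) ≤ 10 ^ n - 1 :=
          min_le_left _ _
        omega)]
    simp [pvInnerA]
  | succ k ih =>
    intro s acc hs hk
    by_cases hlt : s < (10 : Int) ^ n
    · rw [PySem.List.pyRange_one_cons hlt]
      simp only [pvInnerA, pvDouble_val n hn s hs hlt]
      by_cases hbr : s * ((10 : Int) ^ n + 1) > maxv
      · rw [if_pos hbr]
        have hq : PySem.Int.floordiv maxv ((10 : Int) ^ n + 1) < s := by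
          rcases lt_or_ge (PySem.Int.floordiv maxv ((10 : Int) ^ n + 1)) s with h | h
          · exact h
          · exact absurd ((PySem.Int.le_floordiv_iff_mul_le hrep).mp h) (by omega)
        have hmin := min_le_right ((10 : Int) ^ n - 1) (PySem.Int.floordiv maxv ((10 : Int) ^ n + 1))
        rw [PySem.List.pyRange_one_eq_nil (by omega)]
        rfl
      · rw [if_neg hbr]
        have hq : s ≤ PySem.Int.floordiv maxv ((10 : Int) ^ n + 1) :=
          (PySem.Int.le_floordiv_iff_mul_le hrep).mpr (by omega)
        have hmin : s ≤ min ((10 : Int) ^ n - 1) (PySem.Int.floordiv maxv ((10 : Int) ^ n + 1)) :=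
          le_min (by omega) hq
        conv_rhs => rw [PySem.List.pyRange_one_cons (by omega), List.foldl_cons]
        exact ih (s + 1) (PySem.Set.add acc (s * ((10 : Int) ^ n + 1))) (by omega) (by omega)
    · have hend : (10 : Int) ^ n ≤ s := by omega
      rw [PySem.List.pyRange_one_eq_nil hend,
        PySem.List.pyRange_one_eq_nil (by
          have : min ((10 : Int) ^ n - 1) (PySem.Int.floordiv maxv ((10 : Int) ^ n + 1)) ≤ 10 ^ n - 1 :=
            min_le_left _ _
          omega)]
      simp [pvInnerA]

-- ===== VERDICT (by name: the statement is the Claim_ definition above) =====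
theorem generate_invalid_ids_spec : Claim_equal_generate_invalid_ids := by
  intro maxv _
  unfold Spec_generate_invalid_ids generate_invalid_ids generate_invalid_ids_alt
  apply PySem.List.foldl_congr_mem
  intro acc L hL
  have hL1 : 1 ≤ L := (PySem.List.mem_pyRange_one.mp hL).1
  have hn : 1 ≤ L.toNat := by omega
  have ht : (L - 1).toNat = L.toNat - 1 := by omega
  simp only [ht]
  exact pvInner_eq L.toNat hn maxv _ _ acc (le_refl _) (le_refl _)
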